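-- pv_equiv track=rewrite | github.com/raghulrage/Python-programs | Basic-programs/correct path.py | CorrectPath
-- ===== SOURCE A (Python) =====
-- def CorrectPath(s):
--     res=""
--     d=s.count("d")-s.count("u")
--     r=s.count("r")-s.count('l')
--     for i in s:
--         if i=="?":
--             if d<4:
--                 res=res+"d"
--                 d=d+1
--             elif d>4:
--                 res=res+"u"
--                 d=d-1
--             elif r<4:
--                 res=res+"r"
--                 r=r+1
--             elif r>4:
--                 res=res+"l"
--                 r=r-1
--         else:
--             res=res+i
--     return res
-- ===== SOURCE B (Python) =====
-- def CorrectPath(s):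
--     d = s.count("d") - s.count("u")
--     r = s.count("r") - s.count("l")
--     # precompute the whole replacement queue, then do one substitution pass
--     fill = ("d" if d < 4 else "u") * abs(4 - d) + ("r" if r < 4 else "l") * abs(4 - r)
--     it = iter(fill)
--     out = []
--     for c in s:
--         if c == "?":
--             nxt = next(it, None)
--             if nxt is not None:
--                 out.append(nxt)
--         else:
--             out.append(c)
--     return "".join(out)
-- ===== Notes on version B (the rewrite author's own statement) =====
-- stated objective: simpler
-- what changed: B precomputes the full replacement-character queue from the d/r counts in closed form and then makes one stateless substitution pass over s, instead of A's loop that re-decides the direction and mutates the d/r counters at every placeholder character.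
import Mathlib
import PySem

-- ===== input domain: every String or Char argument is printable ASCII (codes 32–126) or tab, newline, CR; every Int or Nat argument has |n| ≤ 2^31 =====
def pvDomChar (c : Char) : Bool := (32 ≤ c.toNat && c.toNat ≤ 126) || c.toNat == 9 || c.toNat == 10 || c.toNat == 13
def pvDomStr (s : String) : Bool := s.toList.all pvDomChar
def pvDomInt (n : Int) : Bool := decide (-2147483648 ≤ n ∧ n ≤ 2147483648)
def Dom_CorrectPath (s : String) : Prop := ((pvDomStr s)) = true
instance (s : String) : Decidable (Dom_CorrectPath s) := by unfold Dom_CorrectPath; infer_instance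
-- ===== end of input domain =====

-- B replaces A's stateful greedy loop (counters mutated at every '?') by a closed-form
-- precomputed replacement queue plus one stateless substitution pass (objective: simpler).

-- ===== PORT A =====
-- A's loop body: state (res, d, r), one step per character of s.
def aStep (st : List Char × Int × Int) (i : Char) : List Char × Int × Int :=
  match st with
  | (res, d, r) =>
    if i = '?' then
      if d < 4 then (res ++ ['d'], d + 1, r)
      else if d > 4 then (res ++ ['u'], d - 1, r)
      else if r < 4 then (res ++ ['r'], d, r + 1)
      else if r > 4 then (res ++ ['l'], d, r - 1)
      else (res, d, r)
    else (res ++ [i], d, r)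

def CorrectPath (s : String) : String :=
  let d : Int := (PySem.Str.count s "d" : Int) - (PySem.Str.count s "u" : Int)
  let r : Int := (PySem.Str.count s "r" : Int) - (PySem.Str.count s "l" : Int)
  String.mk (s.toList.foldl aStep ([], d, r)).1

-- ===== PORT B =====
-- the precomputed replacement queue: ('d' if d<4 else 'u')*abs(4-d) + ('r' if r<4 else 'l')*abs(4-r)
def fillQueue (d r : Int) : List Char :=
  List.replicate (4 - d).natAbs (if d < 4 then 'd' else 'u')
    ++ List.replicate (4 - r).natAbs (if r < 4 then 'r' else 'l')

-- B's loop body: state (out, remaining queue); next(it, None) = head of the remaining queue.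
def bStep (st : List Char × List Char) (c : Char) : List Char × List Char :=
  match st with
  | (out, q) =>
    if c = '?' then
      match q with
      | [] => (out, [])
      | x :: xs => (out ++ [x], xs)
    else (out ++ [c], q)

def CorrectPath_alt (s : String) : String :=
  let d : Int := (PySem.Str.count s "d" : Int) - (PySem.Str.count s "u" : Int)
  let r : Int := (PySem.Str.count s "r" : Int) - (PySem.Str.count s "l" : Int)
  String.mk (s.toList.foldl bStep ([], fillQueue d r)).1

-- ===== PRECONDITION & SPEC =====
def Spec_CorrectPath (s : String) (out : String) : Prop := out = CorrectPath_alt s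
instance (s : String) (out : String) : Decidable (Spec_CorrectPath s out) := by unfold Spec_CorrectPath; infer_instance

-- ===== CLAIM (what is proved, stated in full; the proofs are below) =====
def Claim_equal_CorrectPath : Prop := ∀ (s : String), Dom_CorrectPath s → Spec_CorrectPath s (CorrectPath s)

-- ===== LEMMAS AND PROOFS =====

lemma fq_dlt (d r : Int) (h : d < 4) : fillQueue d r = 'd' :: fillQueue (d + 1) r := by
  unfold fillQueue
  have h1 : (4 - d).natAbs = (4 - (d + 1)).natAbs + 1 := by omega
  rw [h1, List.replicate_succ, if_pos h]
  by_cases h2 : d + 1 < 4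
  · simp [h2]
  · have h0 : (4 - (d + 1)).natAbs = 0 := by omega
    simp [h0, h2]

lemma fq_dgt (d r : Int) (h : d > 4) : fillQueue d r = 'u' :: fillQueue (d - 1) r := by
  unfold fillQueue
  have h1 : (4 - d).natAbs = (4 - (d - 1)).natAbs + 1 := by omega
  rw [h1, List.replicate_succ, if_neg (by omega)]
  by_cases h2 : d - 1 < 4
  · exact absurd h2 (by omega)
  · simp [h2]

lemma fq_rlt (d r : Int) (hd : d = 4) (h : r < 4) : fillQueue d r = 'r' :: fillQueue d (r + 1) := by
  subst hd
  unfold fillQueue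
  have h1 : ((4 : Int) - 4).natAbs = 0 := by omega
  have h2 : (4 - r).natAbs = (4 - (r + 1)).natAbs + 1 := by omega
  rw [h1, h2, List.replicate_succ, if_pos h]
  by_cases h3 : r + 1 < 4
  · simp [h3]
  · have h0 : (4 - (r + 1)).natAbs = 0 := by omega
    simp [h0, h3]

lemma fq_rgt (d r : Int) (hd : d = 4) (h : r > 4) : fillQueue d r = 'l' :: fillQueue d (r - 1) := by
  subst hd
  unfold fillQueue
  have h1 : ((4 : Int) - 4).natAbs = 0 := by omega
  have h2 : (4 - r).natAbs = (4 - (r - 1)).natAbs + 1 := by omega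
  rw [h1, h2, List.replicate_succ, if_neg (by omega)]
  by_cases h3 : r - 1 < 4
  · exact absurd h3 (by omega)
  · simp only [List.replicate, List.nil_append, if_neg (show ¬ r < 4 by omega), if_neg h3]

lemma fq_nil (d r : Int) (hd : d = 4) (hr : r = 4) : fillQueue d r = [] := by
  subst hd; subst hr
  unfold fillQueue
  simp

-- the two loops stay in lock-step: A's residual state (d, r) corresponds to B's residual queue
lemma loop_agree : ∀ (cs : List Char) (res : List Char) (d r : Int),
    (cs.foldl aStep (res, d, r)).1 = (cs.foldl bStep (res, fillQueue d r)).1 := by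
  intro cs
  induction cs with
  | nil => intro res d r; rfl
  | cons c cs ih =>
    intro res d r
    simp only [List.foldl]
    by_cases hc : c = '?'
    · by_cases h1 : d < 4
      · rw [fq_dlt d r h1]
        simp only [aStep, bStep, if_pos hc, if_pos h1]
        exact ih _ _ _
      · by_cases h2 : d > 4
        · rw [fq_dgt d r h2]
          simp only [aStep, bStep, if_pos hc, if_neg h1, if_pos h2]
          exact ih _ _ _
        · have hd : d = 4 := by omega
          by_cases h3 : r < 4
          · rw [fq_rlt d r hd h3]
            simp only [aStep, bStep, if_pos hc, if_neg h1, if_neg h2, if_pos h3]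
            exact ih _ _ _
          · by_cases h4 : r > 4
            · rw [fq_rgt d r hd h4]
              simp only [aStep, bStep, if_pos hc, if_neg h1, if_neg h2, if_neg h3, if_pos h4]
              exact ih _ _ _
            · have hr : r = 4 := by omega
              rw [fq_nil d r hd hr]
              simp only [aStep, bStep, if_pos hc, if_neg h1, if_neg h2, if_neg h3, if_neg h4]
              have := ih res d r
              rw [fq_nil d r hd hr] at this
              exact this
    · simp only [aStep, bStep, if_neg hc]
      exact ih _ _ _

-- ===== VERDICT (by name: the statement is the Claim_ definition above) =====
theorem CorrectPath_spec : Claim_equal_CorrectPath := by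
  intro s _
  unfold Spec_CorrectPath CorrectPath CorrectPath_alt
  simp only []
  rw [loop_agree]
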